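-- pv_equiv track=rewrite | github.com/GHevia/granthevia.com | games/QueensAndKnights/generate_puzzle_json.py | attack_squares
-- ===== SOURCE A (Python) =====
-- BOARD_SIZE = 5
--
-- QUEEN_MOVES = [(-1,0), (1,0), (0,-1), (0,1), (-1,-1), (-1,1), (1,-1), (1,1)]
--
-- KNIGHT_MOVES = [(-2,-1), (-2,1), (-1,-2), (-1,2), (1,-2), (1,2), (2,-1), (2,1)]
--
-- def in_bounds(r, c):
--     return 0 <= r < BOARD_SIZE and 0 <= c < BOARD_SIZE
--
-- def attack_squares(r, c, piece):
--     attacked = set()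
--     if piece == 'Q':
--         for dr, dc in QUEEN_MOVES:
--             nr, nc = r + dr, c + dc
--             while in_bounds(nr, nc):
--                 attacked.add((nr, nc))
--                 nr += dr
--                 nc += dc
--     elif piece == 'N':
--         for dr, dc in KNIGHT_MOVES:
--             nr, nc = r + dr, c + dc
--             if in_bounds(nr, nc):
--                 attacked.add((nr, nc))
--     return attacked
-- ===== SOURCE B (Python) =====
-- BOARD_SIZE = 5
--
--
-- def attack_squares(r, c, piece):
--     # Scan every board square and keep those the piece attacks, using a
--     # closed-form attack predicate instead of stepping along offsets.
--     squares = [(i, j) for i in range(BOARD_SIZE) for j in range(BOARD_SIZE)]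
--     if piece == 'Q':
--         return {(i, j) for (i, j) in squares
--                 if (i, j) != (r, c)
--                 and (i == r or j == c or abs(i - r) == abs(j - c))}
--     if piece == 'N':
--         return {(i, j) for (i, j) in squares
--                 if {abs(i - r), abs(j - c)} == {1, 2}}
--     return set()
-- ===== Notes on version B (the rewrite author's own statement) =====
-- stated objective: simpler
-- what changed: B replaces A's ray-walking/offset-stepping with a single filter of all 25 board squares by a closed-form attack predicate (alignment for the queen, the {1,2} distance pair for the knight); Pre_ excludes queen origins off the 5x5 board, an unspecified corner outside the puzzle's natural domain where A's ray walk and B's alignment predicate are both defensible.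
-- outside the precondition, e.g. on attack_squares(1, 669, 'Q'): A returns set(), B returns {(1, 2), (1, 1), (1, 4), (1, 0), (1, 3)}
import Mathlib
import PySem

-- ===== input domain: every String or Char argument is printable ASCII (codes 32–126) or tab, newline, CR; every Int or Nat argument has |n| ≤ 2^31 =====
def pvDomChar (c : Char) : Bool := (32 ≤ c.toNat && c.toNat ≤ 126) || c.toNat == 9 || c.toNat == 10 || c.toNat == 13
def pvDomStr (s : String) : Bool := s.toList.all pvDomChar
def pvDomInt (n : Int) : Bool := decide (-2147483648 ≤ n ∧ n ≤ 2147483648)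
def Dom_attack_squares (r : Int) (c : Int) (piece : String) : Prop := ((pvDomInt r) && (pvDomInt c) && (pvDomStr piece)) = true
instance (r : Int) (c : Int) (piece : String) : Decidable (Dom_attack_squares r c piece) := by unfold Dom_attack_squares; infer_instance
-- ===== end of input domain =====

-- B filters all board squares by a closed-form attack predicate instead of A's ray walking (objective: simpler).
-- Both Pythons return a SET; Python set iteration order is not modelled by PySem, so both
-- ports return the same canonical representation of the returned set: the attacked squares
-- in row-major board order (canonSet). The differential tester compares outputs as sets.

-- ===== PORT A =====
def BOARD_SIZE : Int := 5

def QUEEN_MOVES : List (Int × Int) := [(-1,0), (1,0), (0,-1), (0,1), (-1,-1), (-1,1), (1,-1), (1,1)]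

def KNIGHT_MOVES : List (Int × Int) := [(-2,-1), (-2,1), (-1,-2), (-1,2), (1,-2), (1,2), (2,-1), (2,1)]

def in_bounds (r : Int) (c : Int) : Bool :=
  decide (0 ≤ r) && decide (r < BOARD_SIZE) && decide (0 ≤ c) && decide (c < BOARD_SIZE)

-- row-major list of all board squares (fixes the canonical order of the returned set)
def boardSquares : List (Int × Int) :=
  (PySem.List.pyRange 0 5 1).flatMap (fun i => (PySem.List.pyRange 0 5 1).map (fun j => (i, j)))

-- canonical list representation of a returned set of board squares: row-major order
def canonSet (s : PySem.Set (Int × Int)) : List (Int × Int) :=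
  boardSquares.filter (fun q => PySem.Set.contains s q)

-- A's inner 'while in_bounds(nr, nc)' loop; fuel 5 = BOARD_SIZE suffices: every executed
-- iteration is at an in-bounds position and each step moves some coordinate by ±1
-- monotonically, so at most 5 iterations can pass the in_bounds test.
def rayWalk : Nat → Int → Int → Int → Int → PySem.Set (Int × Int) → PySem.Set (Int × Int)
  | 0, _, _, _, _, acc => acc
  | fuel+1, nr, nc, dr, dc, acc =>
    if in_bounds nr nc then rayWalk fuel (nr + dr) (nc + dc) dr dc (PySem.Set.add acc (nr, nc))
    else acc

def attack_squares (r : Int) (c : Int) (piece : String) : List (Int × Int) :=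
  canonSet
    (if piece = "Q" then
      QUEEN_MOVES.foldl (fun acc d => rayWalk 5 (r + d.1) (c + d.2) d.1 d.2 acc) PySem.Set.empty
    else if piece = "N" then
      KNIGHT_MOVES.foldl (fun acc d =>
        if in_bounds (r + d.1) (c + d.2) then PySem.Set.add acc (r + d.1, c + d.2) else acc)
        PySem.Set.empty
    else PySem.Set.empty)

-- ===== PORT B =====
def attack_squares_alt (r : Int) (c : Int) (piece : String) : List (Int × Int) :=
  if piece = "Q" then
    canonSet (PySem.Set.ofList (boardSquares.filter (fun q =>
      decide (q ≠ (r, c)) &&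
      (decide (q.1 = r) || decide (q.2 = c) || decide (|q.1 - r| = |q.2 - c|)))))
  else if piece = "N" then
    canonSet (PySem.Set.ofList (boardSquares.filter (fun q =>
      decide (({|q.1 - r|, |q.2 - c|} : Finset Int) = {1, 2}))))
  else canonSet PySem.Set.empty

-- ===== PRECONDITION & SPEC =====
-- Pre_ excludes queen origins off the 5×5 board: such inputs lie outside the puzzle's natural
-- domain and what an off-board queen "attacks" is unspecified — A's ray walk (a ray contributes
-- nothing when its first step is off-board) and B's alignment predicate are both defensible
-- readings of that corner, so those inputs are excluded rather than mimicked.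
def Pre_attack_squares (r : Int) (c : Int) (piece : String) : Prop :=
  piece = "Q" → (0 ≤ r ∧ r < 5 ∧ 0 ≤ c ∧ c < 5)
instance (r : Int) (c : Int) (piece : String) : Decidable (Pre_attack_squares r c piece) := by
  unfold Pre_attack_squares; infer_instance

def pvWitness_attack_squares : Int × Int × String := (2, 2, "Q")

def Spec_attack_squares (r : Int) (c : Int) (piece : String) (out : List (Int × Int)) : Prop := out = attack_squares_alt r c piece
instance (r : Int) (c : Int) (piece : String) (out : List (Int × Int)) : Decidable (Spec_attack_squares r c piece out) := by unfold Spec_attack_squares; infer_instance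

-- ===== CLAIM (what is proved, stated in full; the proofs are below) =====
def Claim_equal_attack_squares : Prop := ∀ (r : Int) (c : Int) (piece : String), Dom_attack_squares r c piece → Pre_attack_squares r c piece → Spec_attack_squares r c piece (attack_squares r c piece)

-- ===== LEMMAS AND PROOFS =====

theorem foldl_knight_empty (moves : List (Int × Int)) (r c : Int) (acc : PySem.Set (Int × Int))
    (h : ∀ d ∈ moves, in_bounds (r + d.1) (c + d.2) = false) :
    moves.foldl (fun acc d =>
        if in_bounds (r + d.1) (c + d.2) then PySem.Set.add acc (r + d.1, c + d.2) else acc)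
      acc = acc := by
  induction moves generalizing acc with
  | nil => rfl
  | cons d tl ih =>
      simp only [List.foldl_cons, h d (by simp), if_false, Bool.false_eq_true]
      exact ih acc (fun d hd => h d (by simp [hd]))

theorem mem_boardSquares {q : Int × Int} (h : q ∈ boardSquares) :
    0 ≤ q.1 ∧ q.1 < 5 ∧ 0 ≤ q.2 ∧ q.2 < 5 := by
  revert q h; decide

-- knight case, origin so far off the board that no offset lands on it
theorem knight_far {r c : Int} (h : r < -2 ∨ 6 < r ∨ c < -2 ∨ 6 < c) :
    attack_squares r c "N" = attack_squares_alt r c "N" := by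
  have hib : ∀ dr dc : Int, -2 ≤ dr → dr ≤ 2 → -2 ≤ dc → dc ≤ 2 →
      in_bounds (r + dr) (c + dc) = false := by
    intro dr dc h1 h2 h3 h4
    simp only [in_bounds, BOARD_SIZE, Bool.and_eq_false_iff, decide_eq_false_iff_not, not_le,
      not_lt]
    omega
  have hmv : ∀ d ∈ KNIGHT_MOVES, -2 ≤ d.1 ∧ d.1 ≤ 2 ∧ -2 ≤ d.2 ∧ d.2 ≤ 2 := by decide
  have hA : attack_squares r c "N" = canonSet PySem.Set.empty := by
    unfold attack_squares
    rw [if_neg (by decide : ¬ ("N" : String) = "Q"), if_pos rfl,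
      foldl_knight_empty _ r c _ (fun d hd => by
        obtain ⟨a1, a2, a3, a4⟩ := hmv d hd; exact hib d.1 d.2 a1 a2 a3 a4)]
  have hfilter : boardSquares.filter (fun q =>
      decide (({|q.1 - r|, |q.2 - c|} : Finset Int) = ({1, 2} : Finset Int))) = [] := by
    rw [List.filter_eq_nil_iff]
    intro q hq
    have hb := mem_boardSquares hq
    simp only [decide_eq_true_eq]
    intro hset
    have ha : |q.1 - r| = 1 ∨ |q.1 - r| = 2 := by
      have := (Finset.ext_iff.mp hset (|q.1 - r|)).mp (by simp)
      simpa using this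
    have hb2 : |q.2 - c| = 1 ∨ |q.2 - c| = 2 := by
      have := (Finset.ext_iff.mp hset (|q.2 - c|)).mp (by simp)
      simpa using this
    rcases abs_cases (q.1 - r) with ⟨e1, _⟩ | ⟨e1, _⟩ <;>
      rcases abs_cases (q.2 - c) with ⟨e2, _⟩ | ⟨e2, _⟩ <;>
      rcases ha with ha | ha <;> rcases hb2 with hb | hb <;> omega
  have hB : attack_squares_alt r c "N" = canonSet PySem.Set.empty := by
    unfold attack_squares_alt
    rw [if_neg (by decide : ¬ ("N" : String) = "Q"), if_pos rfl, hfilter]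
    rfl
  rw [hA, hB]

theorem queen_eq (r c : Int) (h1 : 0 ≤ r) (h2 : r < 5) (h3 : 0 ≤ c) (h4 : c < 5) :
    attack_squares r c "Q" = attack_squares_alt r c "Q" := by
  interval_cases r <;> interval_cases c <;> decide

theorem knight_eq (r c : Int) : attack_squares r c "N" = attack_squares_alt r c "N" := by
  by_cases hr : -2 ≤ r ∧ r ≤ 6
  · by_cases hc : -2 ≤ c ∧ c ≤ 6
    · obtain ⟨hr1, hr2⟩ := hr
      obtain ⟨hc1, hc2⟩ := hc
      interval_cases r <;> interval_cases c <;> decide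
    · exact knight_far (by omega)
  · exact knight_far (by omega)

-- ===== VERDICT (by name: the statement is the Claim_ definition above) =====
theorem attack_squares_spec : Claim_equal_attack_squares := by
  intro r c piece _ hpre
  unfold Spec_attack_squares
  by_cases hQ : piece = "Q"
  · subst hQ
    obtain ⟨h1, h2, h3, h4⟩ := hpre rfl
    exact queen_eq r c h1 h2 h3 h4
  · by_cases hN : piece = "N"
    · subst hN; exact knight_eq r c
    · simp [attack_squares, attack_squares_alt, hQ, hN]
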